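-- pv_equiv track=rewrite | github.com/eddiethedean/ryact | scripts/apply_parity_burndown_inventory.py | _patch_wave_burndown_v22_react_incremental_error_handling
-- ===== SOURCE A (Python) =====
-- _BURNDOWN_V22_REACT_IMPLEMENTATIONS: tuple[tuple[str, str, str], ...] = (
--     (
--         "react.ReactIncrementalErrorHandling-test.internal.reactincrementalerrorhandling."
--         "handles_error_thrown_by_top_level_callback",
--         "react.incrementalErrorHandling.topLevelCallbackThrows",
--         "tests_upstream/react/test_incremental_error_top_level_callback_and_lifecycles.py",
--     ),
--     (
--         "react.ReactIncrementalErrorHandling-test.internal.reactincrementalerrorhandling."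
--         "calls_the_correct_lifecycles_on_the_error_boundary_after_catching_an_error_mixed",
--         "react.incrementalErrorHandling.lifecyclesAfterCatch.mixed",
--         "tests_upstream/react/test_incremental_error_top_level_callback_and_lifecycles.py",
--     ),
-- )
--
-- _BURNDOWN_V22_REACT_NON_GOALS: tuple[str, ...] = (
--     "react.ReactIncrementalErrorHandling-test.internal.reactincrementalerrorhandling."
--     "catches_render_error_in_a_boundary_during_full_deferred_mounting",
--     "react.ReactIncrementalErrorHandling-test.internal.reactincrementalerrorhandling."
--     "catches_render_error_in_a_boundary_during_partial_deferred_mounting",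
--     "react.ReactIncrementalErrorHandling-test.internal.reactincrementalerrorhandling."
--     "continues_work_on_other_roots_despite_caught_errors",
--     "react.ReactIncrementalErrorHandling-test.internal.reactincrementalerrorhandling."
--     "continues_work_on_other_roots_despite_uncaught_errors",
--     "react.ReactIncrementalErrorHandling-test.internal.reactincrementalerrorhandling."
--     "defers_additional_sync_work_to_a_separate_event_after_an_error",
--     "react.ReactIncrementalErrorHandling-test.internal.reactincrementalerrorhandling."
--     "does_not_include_offscreen_work_when_retrying_after_an_error",
--     "react.ReactIncrementalErrorHandling-test.internal.reactincrementalerrorhandling."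
--     "handles_error_thrown_by_host_config_while_working_on_failed_root",
--     "react.ReactIncrementalErrorHandling-test.internal.reactincrementalerrorhandling."
--     "propagates_an_error_from_a_noop_error_boundary_during_full_deferred_mounting",
--     "react.ReactIncrementalErrorHandling-test.internal.reactincrementalerrorhandling."
--     "propagates_an_error_from_a_noop_error_boundary_during_partial_deferred_mounting",
--     "react.ReactIncrementalErrorHandling-test.internal.reactincrementalerrorhandling."
--     "provides_component_stack_even_if_overriding_preparestacktrace",
--     "react.ReactIncrementalErrorHandling-test.internal.reactincrementalerrorhandling."
--     "recovers_from_errors_asynchronously",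
--     "react.ReactIncrementalErrorHandling-test.internal.reactincrementalerrorhandling."
--     "recovers_from_errors_asynchronously_legacy_no_getderivedstatefromerror",
--     "react.ReactIncrementalErrorHandling-test.internal.reactincrementalerrorhandling."
--     "recovers_from_uncaught_reconciler_errors",
--     "react.ReactIncrementalErrorHandling-test.internal.reactincrementalerrorhandling."
--     "retries_at_a_lower_priority_if_there_s_additional_pending_work",
--     "react.ReactIncrementalErrorHandling-test.internal.reactincrementalerrorhandling."
--     "retries_one_more_time_before_handling_error",
--     "react.ReactIncrementalErrorHandling-test.internal.reactincrementalerrorhandling."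
--     "retries_one_more_time_if_an_error_occurs_during_a_render_that_expires_midway_through_the_tree",
--     "react.ReactIncrementalErrorHandling-test.internal.reactincrementalerrorhandling."
--     "uncaught_errors_are_discarded_if_the_render_is_aborted_case_2",
--     "react.ReactIncrementalErrorHandling-test.internal.reactincrementalerrorhandling."
--     "uncaught_errors_should_be_discarded_if_the_render_is_aborted",
--     "react.ReactIncrementalErrorHandling-test.internal.reactincrementalerrorhandling."
--     "unmounts_components_with_uncaught_errors",
--     "react.ReactIncrementalErrorHandling-test.internal.reactincrementalerrorhandling."
--     "unwinds_the_context_stack_correctly_on_error",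
-- )
--
-- def _patch_wave_burndown_v22_react_incremental_error_handling(cases: list[dict]) -> int:
--     changed = 0
--     non_goal_rationale = (
--         "Deferred: requires multi-root work, render interruption/expiration, "
--         "retry-at-lower-priority logic, or deeper context stack semantics beyond the "
--         "current noop incremental model."
--     )
--     for row_id, manifest_id, py_test in _BURNDOWN_V22_REACT_IMPLEMENTATIONS:
--         for c in cases:
--             if c.get("id") != row_id or c.get("status") != "pending":
--                 continue
--             c["status"] = "implemented"
--             c["manifest_id"] = manifest_id
--             c["python_test"] = py_test
--             c["non_goal_rationale"] = None
--             changed += 1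
--             break
--
--     targets = set(_BURNDOWN_V22_REACT_NON_GOALS)
--     for c in cases:
--         if c.get("id") not in targets:
--             continue
--         if c.get("status") != "pending":
--             continue
--         c["status"] = "non_goal"
--         c["manifest_id"] = None
--         c["python_test"] = None
--         c["non_goal_rationale"] = non_goal_rationale
--         changed += 1
--
--     return changed
-- ===== SOURCE B (Python) =====
-- _BURNDOWN_V22_REACT_IMPLEMENTATIONS: tuple[tuple[str, str, str], ...] = (
--     (
--         "react.ReactIncrementalErrorHandling-test.internal.reactincrementalerrorhandling."
--         "handles_error_thrown_by_top_level_callback",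
--         "react.incrementalErrorHandling.topLevelCallbackThrows",
--         "tests_upstream/react/test_incremental_error_top_level_callback_and_lifecycles.py",
--     ),
--     (
--         "react.ReactIncrementalErrorHandling-test.internal.reactincrementalerrorhandling."
--         "calls_the_correct_lifecycles_on_the_error_boundary_after_catching_an_error_mixed",
--         "react.incrementalErrorHandling.lifecyclesAfterCatch.mixed",
--         "tests_upstream/react/test_incremental_error_top_level_callback_and_lifecycles.py",
--     ),
-- )
--
-- _BURNDOWN_V22_REACT_NON_GOALS: tuple[str, ...] = (
--     "react.ReactIncrementalErrorHandling-test.internal.reactincrementalerrorhandling."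
--     "catches_render_error_in_a_boundary_during_full_deferred_mounting",
--     "react.ReactIncrementalErrorHandling-test.internal.reactincrementalerrorhandling."
--     "catches_render_error_in_a_boundary_during_partial_deferred_mounting",
--     "react.ReactIncrementalErrorHandling-test.internal.reactincrementalerrorhandling."
--     "continues_work_on_other_roots_despite_caught_errors",
--     "react.ReactIncrementalErrorHandling-test.internal.reactincrementalerrorhandling."
--     "continues_work_on_other_roots_despite_uncaught_errors",
--     "react.ReactIncrementalErrorHandling-test.internal.reactincrementalerrorhandling."
--     "defers_additional_sync_work_to_a_separate_event_after_an_error",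
--     "react.ReactIncrementalErrorHandling-test.internal.reactincrementalerrorhandling."
--     "does_not_include_offscreen_work_when_retrying_after_an_error",
--     "react.ReactIncrementalErrorHandling-test.internal.reactincrementalerrorhandling."
--     "handles_error_thrown_by_host_config_while_working_on_failed_root",
--     "react.ReactIncrementalErrorHandling-test.internal.reactincrementalerrorhandling."
--     "propagates_an_error_from_a_noop_error_boundary_during_full_deferred_mounting",
--     "react.ReactIncrementalErrorHandling-test.internal.reactincrementalerrorhandling."
--     "propagates_an_error_from_a_noop_error_boundary_during_partial_deferred_mounting",
--     "react.ReactIncrementalErrorHandling-test.internal.reactincrementalerrorhandling."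
--     "provides_component_stack_even_if_overriding_preparestacktrace",
--     "react.ReactIncrementalErrorHandling-test.internal.reactincrementalerrorhandling."
--     "recovers_from_errors_asynchronously",
--     "react.ReactIncrementalErrorHandling-test.internal.reactincrementalerrorhandling."
--     "recovers_from_errors_asynchronously_legacy_no_getderivedstatefromerror",
--     "react.ReactIncrementalErrorHandling-test.internal.reactincrementalerrorhandling."
--     "recovers_from_uncaught_reconciler_errors",
--     "react.ReactIncrementalErrorHandling-test.internal.reactincrementalerrorhandling."
--     "retries_at_a_lower_priority_if_there_s_additional_pending_work",
--     "react.ReactIncrementalErrorHandling-test.internal.reactincrementalerrorhandling."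
--     "retries_one_more_time_before_handling_error",
--     "react.ReactIncrementalErrorHandling-test.internal.reactincrementalerrorhandling."
--     "retries_one_more_time_if_an_error_occurs_during_a_render_that_expires_midway_through_the_tree",
--     "react.ReactIncrementalErrorHandling-test.internal.reactincrementalerrorhandling."
--     "uncaught_errors_are_discarded_if_the_render_is_aborted_case_2",
--     "react.ReactIncrementalErrorHandling-test.internal.reactincrementalerrorhandling."
--     "uncaught_errors_should_be_discarded_if_the_render_is_aborted",
--     "react.ReactIncrementalErrorHandling-test.internal.reactincrementalerrorhandling."
--     "unmounts_components_with_uncaught_errors",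
--     "react.ReactIncrementalErrorHandling-test.internal.reactincrementalerrorhandling."
--     "unwinds_the_context_stack_correctly_on_error",
-- )
--
--
-- def _patch_wave_burndown_v22_react_incremental_error_handling(cases: list[dict]) -> int:
--     # Single pass over `cases` with a prebuilt id -> (manifest_id, python_test) map,
--     # a non-goal id set, and a `used` set so each implementation id claims only its
--     # first pending case (same values and same mutations as the two-scan original).
--     impl_map = {
--         row_id: (manifest_id, py_test)
--         for row_id, manifest_id, py_test in _BURNDOWN_V22_REACT_IMPLEMENTATIONS
--     }
--     non_goals = set(_BURNDOWN_V22_REACT_NON_GOALS)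
--     rationale = (
--         "Deferred: requires multi-root work, render interruption/expiration, "
--         "retry-at-lower-priority logic, or deeper context stack semantics beyond the "
--         "current noop incremental model."
--     )
--     used: set[str] = set()
--     changed = 0
--     for c in cases:
--         if c.get("status") != "pending":
--             continue
--         cid = c.get("id")
--         if cid in impl_map and cid not in used:
--             manifest_id, py_test = impl_map[cid]
--             c["status"] = "implemented"
--             c["manifest_id"] = manifest_id
--             c["python_test"] = py_test
--             c["non_goal_rationale"] = None
--             used.add(cid)
--             changed += 1
--         elif cid in non_goals:
--             c["status"] = "non_goal"
--             c["manifest_id"] = None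
--             c["python_test"] = None
--             c["non_goal_rationale"] = rationale
--             changed += 1
--     return changed
-- ===== Notes on version B (the rewrite author's own statement) =====
-- stated objective: simpler
-- what changed: B replaces A's two whole-list scans (one per implementation row, each with a break) plus a separate non-goal pass by a single traversal of cases using a prebuilt id->(manifest_id, python_test) map, a non-goal set and a consumed-id set that preserves the first-pending-match-only semantics.
import Mathlib
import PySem

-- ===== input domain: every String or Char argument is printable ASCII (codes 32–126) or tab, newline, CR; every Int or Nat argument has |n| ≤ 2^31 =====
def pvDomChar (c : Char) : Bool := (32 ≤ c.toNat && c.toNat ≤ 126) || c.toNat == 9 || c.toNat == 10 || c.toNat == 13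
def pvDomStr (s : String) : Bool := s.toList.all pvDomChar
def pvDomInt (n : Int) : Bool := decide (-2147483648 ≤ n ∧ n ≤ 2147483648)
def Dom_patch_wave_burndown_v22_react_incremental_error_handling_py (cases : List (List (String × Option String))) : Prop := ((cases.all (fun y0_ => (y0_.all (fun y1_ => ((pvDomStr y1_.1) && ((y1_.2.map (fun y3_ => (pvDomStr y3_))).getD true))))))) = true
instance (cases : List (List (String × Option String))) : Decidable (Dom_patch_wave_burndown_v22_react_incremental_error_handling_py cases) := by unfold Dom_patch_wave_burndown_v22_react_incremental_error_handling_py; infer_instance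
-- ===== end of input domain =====

-- Header: B replaces A's two per-implementation-row scans of `cases` plus a separate
-- non-goal scan by ONE pass over `cases` with a prebuilt id map, a non-goal set and a
-- `used` set (objective: simpler single traversal). Both A and B mutate the case dicts
-- identically in Python; the equivalence proved here is about the RETURN value.

-- ===== PORT A =====
def pvImplRows : List (String × String × String) := [
  ("react.ReactIncrementalErrorHandling-test.internal.reactincrementalerrorhandling.handles_error_thrown_by_top_level_callback", "react.incrementalErrorHandling.topLevelCallbackThrows", "tests_upstream/react/test_incremental_error_top_level_callback_and_lifecycles.py"),
  ("react.ReactIncrementalErrorHandling-test.internal.reactincrementalerrorhandling.calls_the_correct_lifecycles_on_the_error_boundary_after_catching_an_error_mixed", "react.incrementalErrorHandling.lifecyclesAfterCatch.mixed", "tests_upstream/react/test_incremental_error_top_level_callback_and_lifecycles.py")]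

def pvNonGoals : List String := [
  "react.ReactIncrementalErrorHandling-test.internal.reactincrementalerrorhandling.catches_render_error_in_a_boundary_during_full_deferred_mounting",
  "react.ReactIncrementalErrorHandling-test.internal.reactincrementalerrorhandling.catches_render_error_in_a_boundary_during_partial_deferred_mounting",
  "react.ReactIncrementalErrorHandling-test.internal.reactincrementalerrorhandling.continues_work_on_other_roots_despite_caught_errors",
  "react.ReactIncrementalErrorHandling-test.internal.reactincrementalerrorhandling.continues_work_on_other_roots_despite_uncaught_errors",
  "react.ReactIncrementalErrorHandling-test.internal.reactincrementalerrorhandling.defers_additional_sync_work_to_a_separate_event_after_an_error",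
  "react.ReactIncrementalErrorHandling-test.internal.reactincrementalerrorhandling.does_not_include_offscreen_work_when_retrying_after_an_error",
  "react.ReactIncrementalErrorHandling-test.internal.reactincrementalerrorhandling.handles_error_thrown_by_host_config_while_working_on_failed_root",
  "react.ReactIncrementalErrorHandling-test.internal.reactincrementalerrorhandling.propagates_an_error_from_a_noop_error_boundary_during_full_deferred_mounting",
  "react.ReactIncrementalErrorHandling-test.internal.reactincrementalerrorhandling.propagates_an_error_from_a_noop_error_boundary_during_partial_deferred_mounting",
  "react.ReactIncrementalErrorHandling-test.internal.reactincrementalerrorhandling.provides_component_stack_even_if_overriding_preparestacktrace",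
  "react.ReactIncrementalErrorHandling-test.internal.reactincrementalerrorhandling.recovers_from_errors_asynchronously",
  "react.ReactIncrementalErrorHandling-test.internal.reactincrementalerrorhandling.recovers_from_errors_asynchronously_legacy_no_getderivedstatefromerror",
  "react.ReactIncrementalErrorHandling-test.internal.reactincrementalerrorhandling.recovers_from_uncaught_reconciler_errors",
  "react.ReactIncrementalErrorHandling-test.internal.reactincrementalerrorhandling.retries_at_a_lower_priority_if_there_s_additional_pending_work",
  "react.ReactIncrementalErrorHandling-test.internal.reactincrementalerrorhandling.retries_one_more_time_before_handling_error",
  "react.ReactIncrementalErrorHandling-test.internal.reactincrementalerrorhandling.retries_one_more_time_if_an_error_occurs_during_a_render_that_expires_midway_through_the_tree",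
  "react.ReactIncrementalErrorHandling-test.internal.reactincrementalerrorhandling.uncaught_errors_are_discarded_if_the_render_is_aborted_case_2",
  "react.ReactIncrementalErrorHandling-test.internal.reactincrementalerrorhandling.uncaught_errors_should_be_discarded_if_the_render_is_aborted",
  "react.ReactIncrementalErrorHandling-test.internal.reactincrementalerrorhandling.unmounts_components_with_uncaught_errors",
  "react.ReactIncrementalErrorHandling-test.internal.reactincrementalerrorhandling.unwinds_the_context_stack_correctly_on_error"]

def pvRationale : String := "Deferred: requires multi-root work, render interruption/expiration, retry-at-lower-priority logic, or deeper context stack semantics beyond the current noop incremental model."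

-- skip condition of A's inner loop: c.get("id") != row_id or c.get("status") != "pending"
def pvCaseSkip (rid : String) (c : PySem.Dict String (Option String)) : Bool :=
  (c.getD "id" none != some rid) || (c.getD "status" none != some "pending")

-- the four assignments of A's first loop body
def pvMarkImpl (mid pyt : String) (c : PySem.Dict String (Option String)) : PySem.Dict String (Option String) :=
  ((((c.insert "status" (some "implemented")).insert "manifest_id" (some mid)).insert
      "python_test" (some pyt)).insert "non_goal_rationale" none)

-- A's inner `for c in cases: … break`: first non-skipped case is marked, count 0/1
def pvScanA (rid mid pyt : String) :
    List (PySem.Dict String (Option String)) → List (PySem.Dict String (Option String)) × Int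
  | [] => ([], 0)
  | c :: rest =>
    if pvCaseSkip rid c then
      let p := pvScanA rid mid pyt rest
      (c :: p.1, p.2)
    else
      (pvMarkImpl mid pyt c :: rest, 1)

-- condition of A's second loop (its two sequential `continue` tests)
def pvNgCond (targets : List String) (c : PySem.Dict String (Option String)) : Bool :=
  ((c.getD "id" none).any (fun s => targets.contains s)) && (c.getD "status" none == some "pending")

-- the four assignments of A's second loop body
def pvMarkNg (c : PySem.Dict String (Option String)) : PySem.Dict String (Option String) :=
  (((c.insert "status" (some "non_goal")).insert "manifest_id" none).insert
      "python_test" none).insert "non_goal_rationale" (some pvRationale)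

-- A's second loop: mutates matching cases, counts them
def pvLoop2 (targets : List String) :
    List (PySem.Dict String (Option String)) → List (PySem.Dict String (Option String)) × Int
  | [] => ([], 0)
  | c :: rest =>
    let p := pvLoop2 targets rest
    if pvNgCond targets c then (pvMarkNg c :: p.1, p.2 + 1) else (c :: p.1, p.2)

def patch_wave_burndown_v22_react_incremental_error_handling_py (cases : List (List (String × Option String))) : Int :=
  let cs0 := cases.map PySem.Dict.mk
  let st := pvImplRows.foldl
    (fun (st : List (PySem.Dict String (Option String)) × Int) row =>
      let p := pvScanA row.1 row.2.1 row.2.2 st.1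
      (p.1, st.2 + p.2)) (cs0, (0 : Int))
  let targets := PySem.Set.ofList pvNonGoals
  st.2 + (pvLoop2 targets st.1).2

-- ===== PORT B =====
-- B's single pass: `used` set threaded through, one case analysis per case
def pvLoopB (implMap : PySem.Dict String (String × String)) (targets : List String)
    (used : List String) :
    List (PySem.Dict String (Option String)) → Int
  | [] => 0
  | c :: rest =>
    if c.getD "status" none != some "pending" then
      pvLoopB implMap targets used rest
    else
      match c.getD "id" none with
      | none => pvLoopB implMap targets used rest
      | some cid =>
        if implMap.contains cid && !(used.contains cid) then
          1 + pvLoopB implMap targets (PySem.Set.add used cid) rest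
        else if targets.contains cid then
          1 + pvLoopB implMap targets used rest
        else
          pvLoopB implMap targets used rest

def patch_wave_burndown_v22_react_incremental_error_handling_py_alt (cases : List (List (String × Option String))) : Int :=
  let implMap := PySem.Dict.ofList (pvImplRows.map (fun r => (r.1, r.2)))
  let targets := PySem.Set.ofList pvNonGoals
  pvLoopB implMap targets [] (cases.map PySem.Dict.mk)

-- ===== PRECONDITION & SPEC =====
def Spec_patch_wave_burndown_v22_react_incremental_error_handling_py (cases : List (List (String × Option String))) (out : Int) : Prop := out = patch_wave_burndown_v22_react_incremental_error_handling_py_alt cases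
instance (cases : List (List (String × Option String))) (out : Int) : Decidable (Spec_patch_wave_burndown_v22_react_incremental_error_handling_py cases out) := by unfold Spec_patch_wave_burndown_v22_react_incremental_error_handling_py; infer_instance

-- ===== CLAIM (what is proved, stated in full; the proofs are below) =====
def Claim_equal_patch_wave_burndown_v22_react_incremental_error_handling_py : Prop := ∀ (cases : List (List (String × Option String))), Dom_patch_wave_burndown_v22_react_incremental_error_handling_py cases → Spec_patch_wave_burndown_v22_react_incremental_error_handling_py cases (patch_wave_burndown_v22_react_incremental_error_handling_py cases)

-- ===== LEMMAS AND PROOFS =====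

def pvR1 : String := "react.ReactIncrementalErrorHandling-test.internal.reactincrementalerrorhandling.handles_error_thrown_by_top_level_callback"
def pvR2 : String := "react.ReactIncrementalErrorHandling-test.internal.reactincrementalerrorhandling.calls_the_correct_lifecycles_on_the_error_boundary_after_catching_an_error_mixed"

def pvHit (rid : String) (c : PySem.Dict String (Option String)) : Bool :=
  (c.getD "id" none == some rid) && (c.getD "status" none == some "pending")

theorem pvCaseSkip_eq (rid : String) (c : PySem.Dict String (Option String)) :
    pvCaseSkip rid c = !pvHit rid c := by
  simp [pvCaseSkip, pvHit, bne, Bool.not_and]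

theorem pvIdOf_markImpl (mid pyt : String) (c : PySem.Dict String (Option String)) :
    (pvMarkImpl mid pyt c).getD "id" none = c.getD "id" none := by
  unfold pvMarkImpl
  rw [PySem.Dict.getD_insert_of_ne, PySem.Dict.getD_insert_of_ne,
      PySem.Dict.getD_insert_of_ne, PySem.Dict.getD_insert_of_ne] <;> decide

theorem pvScanA_count (rid mid pyt : String) (l : List (PySem.Dict String (Option String))) :
    (pvScanA rid mid pyt l).2 = if l.any (pvHit rid) then 1 else 0 := by
  induction l with
  | nil => simp [pvScanA]
  | cons c rest ih =>
    by_cases h : pvHit rid c = true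
    · simp [pvScanA, pvCaseSkip_eq, h]
    · simp [pvScanA, pvCaseSkip_eq, h, ih]

theorem pvScanA_hit (rid rid' mid pyt : String) (h : rid' ≠ rid)
    (l : List (PySem.Dict String (Option String))) :
    (pvScanA rid mid pyt l).1.any (pvHit rid') = l.any (pvHit rid') := by
  induction l with
  | nil => simp [pvScanA]
  | cons c rest ih =>
    by_cases hc : pvHit rid c = true
    · have hid : c.getD "id" none = some rid := by
        have := hc; unfold pvHit at this
        exact eq_of_beq (Bool.and_elim_left this)
      have hmark : pvHit rid' (pvMarkImpl mid pyt c) = false := by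
        unfold pvHit
        rw [pvIdOf_markImpl, hid]
        simp [Ne.symm h]
      have horig : pvHit rid' c = false := by
        unfold pvHit
        rw [hid]
        simp [Ne.symm h]
      simp [pvScanA, pvCaseSkip_eq, hc, hmark, horig]
    · simp [pvScanA, pvCaseSkip_eq, hc, ih]

theorem pvScanA_loop2 (rid mid pyt : String) (targets : List String)
    (h : targets.contains rid = false) (l : List (PySem.Dict String (Option String))) :
    (pvLoop2 targets (pvScanA rid mid pyt l).1).2 = (pvLoop2 targets l).2 := by
  induction l with
  | nil => simp [pvScanA]
  | cons c rest ih =>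
    by_cases hc : pvHit rid c = true
    · have hid : c.getD "id" none = some rid := by
        have := hc; unfold pvHit at this
        exact eq_of_beq (Bool.and_elim_left this)
      have hmem : rid ∉ targets := by simpa using h
      have hmark : pvNgCond targets (pvMarkImpl mid pyt c) = false := by
        unfold pvNgCond
        rw [pvIdOf_markImpl, hid]
        simp [hmem]
      have horig : pvNgCond targets c = false := by
        unfold pvNgCond
        rw [hid]
        simp [hmem]
      simp [pvScanA, pvCaseSkip_eq, hc, pvLoop2, hmark, horig]
    · have hsc : pvScanA rid mid pyt (c :: rest)
          = (c :: (pvScanA rid mid pyt rest).1, (pvScanA rid mid pyt rest).2) := by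
        simp [pvScanA, pvCaseSkip_eq, hc]
      rw [hsc]
      by_cases hng : pvNgCond targets c = true <;> simp [pvLoop2, hng, ih]

theorem pvR1_ne_pvR2 : pvR1 ≠ pvR2 := by decide

theorem pvLoopB_eq (implMap : PySem.Dict String (String × String)) (targets : List String)
    (hC : ∀ cid, implMap.contains cid = (cid == pvR1 || cid == pvR2))
    (h1 : targets.contains pvR1 = false) (h2 : targets.contains pvR2 = false)
    (l : List (PySem.Dict String (Option String))) (used : List String) :
    pvLoopB implMap targets used l =
      (if !used.contains pvR1 && l.any (pvHit pvR1) then 1 else 0)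
      + (if !used.contains pvR2 && l.any (pvHit pvR2) then 1 else 0)
      + (pvLoop2 targets l).2 := by
  induction l generalizing used with
  | nil => simp [pvLoopB, pvLoop2]
  | cons c rest ih =>
    by_cases hp : c.getD "status" none = some "pending"
    · cases hid : c.getD "id" none with
      | none =>
        have h1f : ∀ r, pvHit r c = false := fun r => by simp [pvHit, hid]
        have h2f : pvNgCond targets c = false := by simp [pvNgCond, hid]
        simp [pvLoopB, hp, hid, pvLoop2, h1f, h2f, ih]
      | some cid =>
        have hhit : ∀ r, pvHit r c = (cid == r) := fun r => by simp [pvHit, hid, hp]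
        have hng : pvNgCond targets c = targets.contains cid := by
          simp [pvNgCond, hid, hp]
        have hm1 : pvR1 ∉ targets := by simpa using h1
        have hm2 : pvR2 ∉ targets := by simpa using h2
        have hne : pvR1 ≠ pvR2 := pvR1_ne_pvR2
        have hadd : ∀ y, y ∈ PySem.Set.add used cid ↔ (y = cid ∨ y ∈ used) := by
          intro y; simp [PySem.Set.mem_add, or_comm]
        by_cases hc1 : cid = pvR1
        · by_cases hu : pvR1 ∈ used
          · simp [pvLoopB, hp, hid, hC, hc1, hu, hm1, pvLoop2, hng, hhit, ih, hne]
          · simp [pvLoopB, hp, hid, hC, hc1, hu, hm1, pvLoop2, hng, hhit, ih, hne,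
              Ne.symm hne]
            omega
        · by_cases hc2 : cid = pvR2
          · by_cases hu : pvR2 ∈ used
            · simp [pvLoopB, hp, hid, hC, hc2, hu, hm2, pvLoop2, hng, hhit, ih,
                Ne.symm hne]
            · simp [pvLoopB, hp, hid, hC, hc2, hu, hm2, pvLoop2, hng, hhit, ih, hne,
                Ne.symm hne]
              omega
          · by_cases ht : cid ∈ targets
            · simp [pvLoopB, hp, hid, hC, hc1, hc2, ht, pvLoop2, hng, hhit, ih]
              omega
            · simp [pvLoopB, hp, hid, hC, hc1, hc2, ht, pvLoop2, hng, hhit, ih]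
    · have h1f : ∀ r, pvHit r c = false := fun r => by simp [pvHit, hp]
      have h2f : pvNgCond targets c = false := by simp [pvNgCond, hp]
      simp [pvLoopB, hp, pvLoop2, h1f, h2f, ih]

-- ===== VERDICT (by name: the statement is the Claim_ definition above) =====
set_option maxRecDepth 40000 in
set_option maxHeartbeats 1600000 in
theorem patch_wave_burndown_v22_react_incremental_error_handling_py_spec : Claim_equal_patch_wave_burndown_v22_react_incremental_error_handling_py := by
  intro cases _
  have hmap : PySem.Dict.ofList (pvImplRows.map (fun r => (r.1, r.2)))
      = PySem.Dict.mk (pvImplRows.map (fun r => (r.1, r.2))) := by decide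
  have hC : ∀ cid, (PySem.Dict.ofList (pvImplRows.map (fun r => (r.1, r.2)))).contains cid
      = (cid == pvR1 || cid == pvR2) := by
    intro cid
    rw [hmap]
    by_cases e1 : cid = pvR1
    · simp [pvImplRows, pvR1, pvR2, e1]
    · by_cases e2 : cid = pvR2
      · simp [pvImplRows, pvR1, pvR2, e2]
      · simp only [pvR1, pvR2] at e1 e2
        rw [Bool.eq_iff_iff]
        simp [pvImplRows, pvR1, pvR2, beq_iff_eq, e1, e2, Ne.symm e1, Ne.symm e2]
  have h1 : (PySem.Set.ofList pvNonGoals).contains pvR1 = false := by decide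
  have h2 : (PySem.Set.ofList pvNonGoals).contains pvR2 = false := by decide
  have hAlt : patch_wave_burndown_v22_react_incremental_error_handling_py_alt cases
      = pvLoopB (PySem.Dict.ofList (pvImplRows.map (fun r => (r.1, r.2))))
          (PySem.Set.ofList pvNonGoals) [] (cases.map PySem.Dict.mk) := rfl
  unfold Spec_patch_wave_burndown_v22_react_incremental_error_handling_py
  rw [hAlt, pvLoopB_eq _ _ hC h1 h2]
  unfold patch_wave_burndown_v22_react_incremental_error_handling_py
  simp only [pvImplRows, List.foldl_cons, List.foldl_nil]
  simp only [(show ("react.ReactIncrementalErrorHandling-test.internal.reactincrementalerrorhandling.handles_error_thrown_by_top_level_callback" : String) = pvR1 from rfl), (show ("react.ReactIncrementalErrorHandling-test.internal.reactincrementalerrorhandling.calls_the_correct_lifecycles_on_the_error_boundary_after_catching_an_error_mixed" : String) = pvR2 from rfl)]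
  rw [pvScanA_loop2 _ _ _ _ h2, pvScanA_loop2 _ _ _ _ h1]
  rw [pvScanA_count, pvScanA_count, pvScanA_hit _ _ _ _ (Ne.symm pvR1_ne_pvR2)]
  simp only [pvR1, pvR2, List.contains_nil, Bool.not_false, Bool.true_and]
  rw [zero_add]
  rfl
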